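-- pv_equiv track=rewrite | github.com/josepguedes/Canteen-Microservices | services/recommendations/rules/recommend.py | recommend_dish
-- ===== SOURCE A (Python) =====
-- def recommend_dish(
--     liked: list[int],
--     available: list[dict],
-- ) -> int | None:
--
--     if not available:
--         return None
--
--     available_by_id = {dish["id"]: dish for dish in available}
--     available_categories = {}
--
--     for dish in available:
--         category = dish.get("dish_category", "unknown")
--         if category not in available_categories:
--             available_categories[category] = []
--         available_categories[category].append(dish["id"])
--
--     for dish_id in liked:
--         if dish_id in available_by_id:
--             return dish_id
--
--     if liked:
--
--         if available_categories:
--             largest_category = max(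
--                 available_categories.items(),
--                 key=lambda x: len(x[1])
--             )
--             return largest_category[1][0]
--
--     return available[0]["id"] if available else None
-- ===== SOURCE B (Python) =====
-- def recommend_dish(
--     liked: list[int],
--     available: list[dict],
-- ) -> int | None:
--
--     if not available:
--         return None
--
--     first_pos = {}
--     for i, dish_id in enumerate(liked):
--         if dish_id not in first_pos:
--             first_pos[dish_id] = i
--
--     best_i = None
--     for dish in available:
--         j = first_pos.get(dish["id"])
--         if j is not None and (best_i is None or j < best_i):
--             best_i = j
--     if best_i is not None:
--         return liked[best_i]
--
--     if liked:
--         counts = {}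
--         for dish in available:
--             c = dish.get("dish_category", "unknown")
--             counts[c] = counts.get(c, 0) + 1
--         best = max(available, key=lambda d: counts[d.get("dish_category", "unknown")])
--         return best["id"]
--
--     return available[0]["id"]
-- ===== Notes on version B (the rewrite author's own statement) =====
-- stated objective: alternative
-- what changed: B inverts both scans: the liked lookup becomes a single min-over-available of each dish id's first position in liked (instead of scanning liked against a dict of available ids), and the fallback returns max(available, key=category count) directly (instead of grouping ids per category and taking the first id of the argmax group).
import Mathlib
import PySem

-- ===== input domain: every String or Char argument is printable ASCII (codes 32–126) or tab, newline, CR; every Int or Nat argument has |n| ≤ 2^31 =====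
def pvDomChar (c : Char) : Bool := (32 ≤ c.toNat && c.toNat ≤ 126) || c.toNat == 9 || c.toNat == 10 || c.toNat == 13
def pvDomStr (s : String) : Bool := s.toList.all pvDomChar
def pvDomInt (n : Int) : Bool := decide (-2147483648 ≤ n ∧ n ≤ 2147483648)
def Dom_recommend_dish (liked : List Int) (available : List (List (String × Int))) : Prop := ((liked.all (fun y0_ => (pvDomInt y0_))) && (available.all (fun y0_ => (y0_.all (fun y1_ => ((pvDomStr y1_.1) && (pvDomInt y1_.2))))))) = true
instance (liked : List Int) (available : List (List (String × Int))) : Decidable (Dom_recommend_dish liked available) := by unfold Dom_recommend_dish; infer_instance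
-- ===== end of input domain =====

-- B inverts A's two scans: the liked lookup becomes a min-over-available of each dish's first
-- position in liked (instead of scanning liked against an id dict), and the fallback takes
-- max(available, key = category count) (instead of argmax over grouped per-category id lists).
-- Objective: alternative algorithm of similar cost; return-value equivalence proved on Pre_.

-- ===== PORT A =====
-- dish["k"] / dish.get("k"): lookup in the dish dict (assoc list, first match)
def pvDictGet (dish : List (String × Int)) (k : String) : Option Int :=
  (PySem.Dict.mk dish).get? k

-- dish["id"]; Pre_ guarantees the key is present (Python raises KeyError otherwise)
def pvDishId (dish : List (String × Int)) : Int := (pvDictGet dish "id").getD 0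

-- dish.get("dish_category", "unknown"): none plays the role of the absent "unknown" default
def pvCatOf (dish : List (String × Int)) : Option Int := pvDictGet dish "dish_category"

def recommend_dish (liked : List Int) (available : List (List (String × Int))) : Option Int :=
  if available = [] then none
  else
    let available_by_id : PySem.Dict Int (List (String × Int)) :=
      available.foldl (fun d dish => d.insert (pvDishId dish) dish) PySem.Dict.empty
    let available_categories : PySem.Dict (Option Int) (List Int) :=
      available.foldl (fun d dish =>
        (if d.contains (pvCatOf dish) then d else d.insert (pvCatOf dish) []).modify
          (pvCatOf dish) [] (fun l => l ++ [pvDishId dish])) PySem.Dict.empty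
    match liked.find? (fun dish_id => available_by_id.contains dish_id) with
    | some dish_id => some dish_id
    | none =>
      if liked ≠ [] then
        if available_categories.size ≠ 0 then
          match PySem.List.max? available_categories.items (fun x => x.2.length) with
          | some largest => PySem.List.pyGet? largest.2 0
          | none => none  -- unreachable: the dict is nonempty in this branch
        else match available with | [] => none | dish :: _ => some (pvDishId dish)
      else match available with | [] => none | dish :: _ => some (pvDishId dish)

-- ===== PORT B =====
-- first_pos: id -> index of its first occurrence in liked (insert only when absent)
def pvFirstPos (liked : List Int) : PySem.Dict Int Int :=
  (PySem.List.enumerate liked).foldl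
    (fun d p => if d.contains p.2 then d else d.insert p.2 p.1) PySem.Dict.empty

-- best_i: minimum first-position in liked over the available dishes (None if no overlap)
def pvBestI (liked : List Int) (available : List (List (String × Int))) : Option Int :=
  available.foldl (fun acc dish =>
    match (pvFirstPos liked).get? (pvDishId dish) with
    | none => acc
    | some j =>
      match acc with
      | none => some j
      | some b => if j < b then some j else acc) none

-- counts: Counter of the dish categories
def pvCounts (available : List (List (String × Int))) : PySem.Dict (Option Int) Int :=
  available.foldl (fun d dish => d.insert (pvCatOf dish) (d.getD (pvCatOf dish) 0 + 1))
    PySem.Dict.empty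

def recommend_dish_alt (liked : List Int) (available : List (List (String × Int))) : Option Int :=
  if available = [] then none
  else
    match pvBestI liked available with
    | some b => PySem.List.pyGet? liked b   -- liked[best_i]; best_i is an in-range index
    | none =>
      if liked ≠ [] then
        -- counts[...] never misses: every category of available is counted, so getD is exact
        match PySem.List.max? available (fun dish => (pvCounts available).getD (pvCatOf dish) 0) with
        | some best => some (pvDishId best)
        | none => none  -- unreachable: available is nonempty here
      else match available with | [] => none | dish :: _ => some (pvDishId dish)

-- ===== PRECONDITION & SPEC =====
-- Pre_ excludes exactly the dishes without an "id" key, on which Python A raises KeyError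
-- (so does B; both touch every dish's "id").
def Pre_recommend_dish (liked : List Int) (available : List (List (String × Int))) : Prop :=
  available.all (fun dish => ((PySem.Dict.mk dish).get? "id").isSome) = true
instance (liked : List Int) (available : List (List (String × Int))) : Decidable (Pre_recommend_dish liked available) := by unfold Pre_recommend_dish; infer_instance
def pvWitness_recommend_dish : List Int × (List (List (String × Int))) := ([1], [[("id", 2)], [("id", 3), ("dish_category", 7)]])

def Spec_recommend_dish (liked : List Int) (available : List (List (String × Int))) (out : Option Int) : Prop := out = recommend_dish_alt liked available
instance (liked : List Int) (available : List (List (String × Int))) (out : Option Int) : Decidable (Spec_recommend_dish liked available out) := by unfold Spec_recommend_dish; infer_instance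

-- ===== CLAIM (what is proved, stated in full; the proofs are below) =====
def Claim_equal_recommend_dish : Prop := ∀ (liked : List Int) (available : List (List (String × Int))), Dom_recommend_dish liked available → Pre_recommend_dish liked available → Spec_recommend_dish liked available (recommend_dish liked available)

-- ===== LEMMAS AND PROOFS =====

-- A's two-step "ensure key, then append" equals one modify
lemma pv_step_eq (d : PySem.Dict (Option Int) (List Int)) (c : Option Int) (i : Int) :
    (if d.contains c then d else d.insert c []).modify c [] (fun l => l ++ [i])
      = d.modify c [] (fun l => l ++ [i]) := by
  by_cases h : d.contains c
  · simp [h]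
  · have h' : d.contains c = false := by simpa using h
    simp only [h', Bool.false_eq_true, ↓reduceIte, PySem.Dict.modify]
    rw [PySem.Dict.getD_insert_self, PySem.Dict.insert_insert_self,
      PySem.Dict.getD_of_not_contains _ _ h']

-- first-max over a mapped list
lemma pv_foldl_max_map {α β κ : Type} [LT κ] [DecidableLT κ] (l : List α) (g : α → β)
    (f : β → κ) (acc : Option α) :
    l.foldl (fun acc x =>
        match acc with
        | none => some (g x)
        | some m => if f m < f (g x) then some (g x) else some m) (acc.map g)
      = (l.foldl (fun acc x =>
          match acc with
          | none => some x
          | some m => if f (g m) < f (g x) then some x else some m) acc).map g := by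
  induction l generalizing acc with
  | nil => rfl
  | cons a t ih =>
    cases acc with
    | none => simpa using ih (some a)
    | some m =>
      simp only [List.foldl_cons, Option.map_some]
      by_cases h : f (g m) < f (g a)
      · simpa [h] using ih (some a)
      · simpa [h] using ih (some m)

lemma pv_max?_map {α β κ : Type} [LT κ] [DecidableLT κ] (l : List α) (g : α → β) (f : β → κ) :
    PySem.List.max? (l.map g) f = (PySem.List.max? l (fun x => f (g x))).map g := by
  simp only [PySem.List.max?, List.foldl_map]
  simpa using pv_foldl_max_map l g f none

-- first-max is insensitive to replacing the Nat key by its Int cast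
lemma pv_max?_natCast {α : Type} (l : List α) (k : α → Nat) :
    PySem.List.max? l (fun x => ((k x : Int))) = PySem.List.max? l k := by
  simp [PySem.List.max?]

-- xs[0] is xs.head?
lemma pv_pyGet?_zero {α : Type} (l : List α) : PySem.List.pyGet? l 0 = l.head? := by
  cases l <;> simp [PySem.List.pyGet?, PySem.List.pyIdx?]

-- A's category dict, read back: ids of the dishes of category c, in order
lemma pv_cats_getD (available : List (List (String × Int))) (c : Option Int) :
    (available.foldl (fun d dish => d.modify (pvCatOf dish) [] (fun l => l ++ [pvDishId dish]))
        PySem.Dict.empty).getD c []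
      = (available.filter (fun dish => pvCatOf dish == c)).map pvDishId := by
  have h := PySem.Dict.getD_foldl_modify_append
    (available.map (fun dish => (pvCatOf dish, pvDishId dish))) PySem.Dict.empty c
  rw [List.foldl_map] at h
  simpa [List.filter_map, List.map_map, Function.comp] using h

-- B's count dict is Counter(categories)
lemma pv_counts_eq (available : List (List (String × Int))) :
    pvCounts available = PySem.Dict.counter (available.map pvCatOf) := by
  have h := PySem.Dict.foldl_insert_getD_add_one_eq_counter (available.map pvCatOf)
  rw [List.foldl_map] at h
  exact h

-- A's category dict: keys are the distinct categories in first-occurrence order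
lemma pv_cats_keys (available : List (List (String × Int))) :
    (available.foldl (fun d dish => d.modify (pvCatOf dish) [] (fun l => l ++ [pvDishId dish]))
        PySem.Dict.empty).keys = PySem.Set.ofList (available.map pvCatOf) := by
  have h := PySem.Dict.keys_foldl_modify_key available pvCatOf []
    (fun _ dish l => l ++ [pvDishId dish]) PySem.Dict.empty
  simpa [PySem.Dict.keys_empty, PySem.Set.update_nil_left] using h

lemma pv_cats_nodup (available : List (List (String × Int))) :
    (available.foldl (fun d dish => d.modify (pvCatOf dish) [] (fun l => l ++ [pvDishId dish]))
        PySem.Dict.empty).keys.Nodup :=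
  PySem.Dict.nodup_keys_foldl_modify_key available pvCatOf []
    (fun _ dish l => l ++ [pvDishId dish]) PySem.Dict.empty (by simp [PySem.Dict.keys_empty])

lemma pv_cats_items (available : List (List (String × Int))) :
    (available.foldl (fun d dish => d.modify (pvCatOf dish) [] (fun l => l ++ [pvDishId dish]))
        PySem.Dict.empty).items
      = (PySem.Set.ofList (available.map pvCatOf)).map
          (fun k => (k, (available.foldl
            (fun d dish => d.modify (pvCatOf dish) [] (fun l => l ++ [pvDishId dish]))
            PySem.Dict.empty).getD k [])) := by
  rw [PySem.Dict.items_eq_map_keys _ (pv_cats_nodup available) [], pv_cats_keys]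

-- A's by-id dict answers membership like the id set
lemma pv_byId_keys (available : List (List (String × Int))) :
    (available.foldl (fun d dish => d.insert (pvDishId dish) dish) PySem.Dict.empty).keys
      = PySem.Set.ofList (available.map pvDishId) := by
  have h := PySem.Dict.keys_foldl_insert_key available pvDishId (fun _ dish => dish)
    PySem.Dict.empty
  simpa [PySem.Dict.keys_empty, PySem.Set.update_nil_left] using h

lemma pv_pred_eq (available : List (List (String × Int))) :
    (fun dish_id => (available.foldl (fun d dish => d.insert (pvDishId dish) dish)
        PySem.Dict.empty).contains dish_id)
      = (fun dish_id => (PySem.Set.ofList (available.map pvDishId)).contains dish_id) := by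
  funext i
  rw [PySem.Dict.contains_eq_decide_mem_keys, pv_byId_keys]
  exact (List.contains_eq_mem i _).symm

-- A's two-step loop body is the one-step modify body
lemma pv_body_eq :
    (fun (d : PySem.Dict (Option Int) (List Int)) dish =>
        (if d.contains (pvCatOf dish) then d else d.insert (pvCatOf dish) []).modify
          (pvCatOf dish) [] (fun l => l ++ [pvDishId dish]))
      = (fun d dish => d.modify (pvCatOf dish) [] (fun l => l ++ [pvDishId dish])) :=
  funext fun d => funext fun dish => pv_step_eq d _ _

-- the category-list length A maximises is the category count
lemma pv_key_eq (available : List (List (String × Int))) :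
    (fun k => ((k, (available.foldl
        (fun d dish => d.modify (pvCatOf dish) [] (fun l => l ++ [pvDishId dish]))
        PySem.Dict.empty).getD k []) : Option Int × List Int).2.length)
      = (fun k => (available.map pvCatOf).count k) := by
  funext k
  show ((available.foldl (fun d dish => d.modify (pvCatOf dish) [] (fun l => l ++ [pvDishId dish]))
    PySem.Dict.empty).getD k []).length = _
  rw [pv_cats_getD, List.length_map, List.count, List.countP_map,
    ← List.countP_eq_length_filter]
  rfl

-- find? through set(xs): dropping later duplicates keeps the first satisfying element
lemma pv_find?_update {κ : Type} [BEq κ] [LawfulBEq κ] (p : κ → Bool) :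
    ∀ (xs : List κ) (s : PySem.Set κ),
      List.find? p (PySem.Set.update s xs)
        = (List.find? p s).or (List.find? (fun a => p a && !(decide (a ∈ s))) xs) := by
  intro xs
  induction xs with
  | nil => intro s; simp [PySem.Set.update]
  | cons a xs ih =>
    intro s
    have hupd : PySem.Set.update s (a :: xs) = PySem.Set.update (PySem.Set.add s a) xs := rfl
    by_cases hm : a ∈ s
    · have hadd : PySem.Set.add s a = s := by simp [PySem.Set.add, hm]
      rw [hupd, hadd, ih, List.find?_cons]
      simp [hm]
    · have hadd : PySem.Set.add s a = s ++ [a] := by simp [PySem.Set.add, hm]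
      rw [hupd, hadd, ih, List.find?_append]
      by_cases hp : p a = true
      · have h1 : List.find? p [a] = some a := by simp [hp]
        have h2 : List.find? (fun b => p b && !(decide (b ∈ s))) (a :: xs) = some a := by
          simp [hp, hm]
        rw [h1, h2, Option.or_assoc]
        have : ∀ (z : Option κ), (some a).or z = some a := fun z => rfl
        rw [this]
      · have hp' : p a = false := by simpa using hp
        have h1 : List.find? p [a] = none := by simp [hp']
        have hfun : (fun b => p b && !(decide (b ∈ s ++ [a])))
            = (fun b => p b && !(decide (b ∈ s))) := by
          funext b
          by_cases hb : b = a
          · subst hb; simp [hp']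
          · simp [List.mem_append, hb]
        rw [hfun, h1, Option.or_none]
        simp [hp']

lemma pv_find?_ofList {κ : Type} [BEq κ] [LawfulBEq κ] (p : κ → Bool) (xs : List κ) :
    List.find? p (PySem.Set.ofList xs) = List.find? p xs := by
  have h := pv_find?_update p xs []
  have hof : PySem.Set.ofList xs = PySem.Set.update [] xs := by
    simp [PySem.Set.ofList_eq_foldl, PySem.Set.update]
  rw [hof, h]
  simp

-- first-extremal characterisation of max?: the result is max and is the FIRST with its key value
lemma pv_maxF_spec {α : Type} (f : α → Nat) :
    ∀ (t : List α) (m r : α),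
      t.foldl (fun acc x =>
          match acc with
          | none => some x
          | some m => if f m < f x then some x else some m) (some m) = some r →
      f m ≤ f r ∧ (∀ y ∈ t, f y ≤ f r) ∧
        (r = m ∨ (f m < f r ∧ t.find? (fun y => f y == f r) = some r)) := by
  intro t
  induction t with
  | nil =>
    intro m r h
    simp only [List.foldl_nil, Option.some.injEq] at h
    subst h
    exact ⟨le_refl _, by simp, Or.inl rfl⟩
  | cons a t ih =>
    intro m r h
    simp only [List.foldl_cons] at h
    by_cases hma : f m < f a
    · rw [if_pos hma] at h
      obtain ⟨h1, h2, h3⟩ := ih a r h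
      refine ⟨le_of_lt (lt_of_lt_of_le hma h1), ?_, ?_⟩
      · intro y hy
        rcases List.mem_cons.mp hy with rfl | hy
        · exact h1
        · exact h2 y hy
      · right
        refine ⟨lt_of_lt_of_le hma h1, ?_⟩
        rcases h3 with rfl | ⟨hlt, hfind⟩
        · simp
        · rw [List.find?_cons]
          have : (f a == f r) = false := by simp [Nat.ne_of_lt hlt]
          simp only [this]
          exact hfind
    · rw [if_neg hma] at h
      obtain ⟨h1, h2, h3⟩ := ih m r h
      have ham : f a ≤ f m := le_of_not_gt hma
      refine ⟨h1, ?_, ?_⟩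
      · intro y hy
        rcases List.mem_cons.mp hy with rfl | hy
        · exact le_trans ham h1
        · exact h2 y hy
      · rcases h3 with rfl | ⟨hlt, hfind⟩
        · exact Or.inl rfl
        · right
          refine ⟨hlt, ?_⟩
          rw [List.find?_cons]
          have : (f a == f r) = false := by
            simp [Nat.ne_of_lt (lt_of_le_of_lt ham hlt)]
          simp only [this]
          exact hfind

lemma pv_max?_spec {α : Type} (f : α → Nat) (l : List α) (x : α)
    (h : PySem.List.max? l f = some x) :
    (∀ y ∈ l, f y ≤ f x) ∧ l.find? (fun y => f y == f x) = some x := by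
  cases l with
  | nil => simp [PySem.List.max?] at h
  | cons a t =>
    have h' : t.foldl (fun acc x =>
        match acc with
        | none => some x
        | some m => if f m < f x then some x else some m) (some a) = some x := by
      simpa [PySem.List.max?, List.foldl_cons] using h
    obtain ⟨h1, h2, h3⟩ := pv_maxF_spec f t a x h'
    constructor
    · intro y hy
      rcases List.mem_cons.mp hy with rfl | hy
      · exact h1
      · exact h2 y hy
    · rcases h3 with rfl | ⟨hlt, hfind⟩
      · simp
      · rw [List.find?_cons]
        have : (f a == f x) = false := by simp [Nat.ne_of_lt hlt]
        simp only [this]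
        exact hfind

-- the fallback: element-level first-max by count equals "first dish of the argmax category"
lemma pv_max?_elem_eq_find? {α κ : Type} [BEq κ] [LawfulBEq κ] (l : List α) (g : α → κ)
    (cnt : κ → Nat) (k : κ)
    (hk : PySem.List.max? (PySem.Set.ofList (l.map g)) cnt = some k) :
    PySem.List.max? l (fun d => cnt (g d)) = l.find? (fun d => g d == k) := by
  cases hx : PySem.List.max? l (fun d => cnt (g d)) with
  | none =>
    have hl : l = [] := (PySem.List.max?_eq_none_iff _ _).mp hx
    subst hl
    simp [PySem.Set.ofList, PySem.List.max?] at hk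
  | some x =>
    obtain ⟨hxmax, hxfind⟩ := pv_max?_spec (fun d => cnt (g d)) l x hx
    obtain ⟨hkmax, hkfind⟩ := pv_max?_spec cnt _ k hk
    -- cnt (g x) = cnt k
    have hkmem : k ∈ l.map g := by
      have := PySem.List.max?_mem hk
      rwa [PySem.Set.mem_ofList] at this
    obtain ⟨d0, hd0, hd0k⟩ := List.mem_map.mp hkmem
    have hle1 : cnt k ≤ cnt (g x) := by
      have := hxmax d0 hd0
      rwa [hd0k] at this
    have hle2 : cnt (g x) ≤ cnt k := by
      have hmem : g x ∈ PySem.Set.ofList (l.map g) := by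
        rw [PySem.Set.mem_ofList]
        exact List.mem_map_of_mem (List.mem_of_find?_eq_some hxfind)
      exact hkmax _ hmem
    have hM : cnt (g x) = cnt k := le_antisymm hle2 hle1
    -- k = g x
    have hfcats : List.find? (fun κ' => cnt κ' == cnt k) (l.map g) = some k := by
      rw [← pv_find?_ofList]
      exact hkfind
    have hgx : k = g x := by
      rw [List.find?_map] at hfcats
      have hpred : ((fun κ' => cnt κ' == cnt k) ∘ g)
          = (fun d => cnt (g d) == cnt (g x)) := by
        funext d
        simp [Function.comp, hM]
      rw [hpred, hxfind] at hfcats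
      simpa using hfcats.symm
    -- assemble: x is the first element with key k
    subst hgx
    obtain ⟨hpx, as, bs, hsplit, has⟩ := List.find?_eq_some_iff_append.mp hxfind
    rw [hsplit]
    rw [List.find?_append]
    have h1 : List.find? (fun d => g d == g x) as = none := by
      rw [List.find?_eq_none]
      intro d hd
      have hd' := has d hd
      simp only [Bool.not_eq_eq_eq_not, Bool.not_true] at hd'
      intro hcontra
      have : g d = g x := by simpa using hcontra
      rw [this] at hd'
      simp at hd'
    rw [h1]
    simp

-- first_pos read back: the index of the first occurrence in liked
lemma pv_keepfirst :
    ∀ (ps : List (Int × Int)) (d : PySem.Dict Int Int) (x : Int),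
      (ps.foldl (fun d p => if d.contains p.2 then d else d.insert p.2 p.1) d).get? x
        = (d.get? x).or ((ps.find? (fun p => p.2 == x)).map Prod.fst) := by
  intro ps
  induction ps with
  | nil => intro d x; simp
  | cons p ps ih =>
    intro d x
    simp only [List.foldl_cons]
    by_cases hx : p.2 = x
    · subst hx
      by_cases hc : d.contains p.2 = true
      · rw [if_pos hc, ih, List.find?_cons]
        have hvs : ∃ v, d.get? p.2 = some v := by
          apply Option.isSome_iff_exists.mp
          rw [← PySem.Dict.contains_eq_isSome_get?]
          exact hc
        obtain ⟨v, hv⟩ := hvs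
        simp [hv]
      · have hget : d.get? p.2 = none := by
          apply Option.not_isSome_iff_eq_none.mp
          rw [← PySem.Dict.contains_eq_isSome_get?]
          simpa using hc
        rw [if_neg hc, ih, PySem.Dict.get?_insert_self, hget, List.find?_cons]
        simp
    · have hne : (p.2 == x) = false := by simpa using hx
      rw [List.find?_cons]
      simp only [hne]
      by_cases hc : d.contains p.2 = true
      · rw [if_pos hc, ih]
      · rw [if_neg hc, ih, PySem.Dict.get?_insert_of_ne d p.1 (Ne.symm hx)]

lemma pv_firstPos_get? (liked : List Int) (x : Int) :
    (pvFirstPos liked).get? x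
      = ((PySem.List.enumerate liked).find? (fun p => p.2 == x)).map Prod.fst := by
  rw [pvFirstPos, pv_keepfirst]
  simp

-- the min fold over the present positions
lemma pv_minfold_filterMap {α : Type} (h : α → Option Int) (l : List α) :
    ∀ (acc : Option Int),
      l.foldl (fun acc d =>
          match h d with
          | none => acc
          | some j =>
            match acc with
            | none => some j
            | some b => if j < b then some j else acc) acc
        = (l.filterMap h).foldl (fun acc j =>
            match acc with
            | none => some j
            | some b => if j < b then some j else acc) acc := by
  induction l with
  | nil => intro acc; rfl
  | cons a l ih =>
    intro acc
    simp only [List.foldl_cons, List.filterMap_cons]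
    cases ha : h a with
    | none => exact ih acc
    | some j => simp only [List.foldl_cons]; exact ih _

lemma pv_minfold_some (vs : List Int) :
    ∀ (b : Int),
      vs.foldl (fun acc j =>
          match acc with
          | none => some j
          | some b => if j < b then some j else acc) (some b)
        = some (vs.foldl min b) := by
  induction vs with
  | nil => intro b; rfl
  | cons v vs ih =>
    intro b
    simp only [List.foldl_cons]
    have : (if v < b then some v else some b) = some (min b v) := by
      by_cases h : v < b
      · rw [if_pos h, min_eq_right (le_of_lt h)]
      · rw [if_neg h, min_eq_left (le_of_not_gt h)]
    rw [this, ih]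

lemma pv_minfold_char (vs : List Int) (m : Int) (hm : m ∈ vs) (hle : ∀ v ∈ vs, m ≤ v) :
    vs.foldl (fun acc j =>
        match acc with
        | none => some j
        | some b => if j < b then some j else acc) none = some m := by
  cases vs with
  | nil => simp at hm
  | cons v vs =>
    simp only [List.foldl_cons]
    rw [pv_minfold_some]
    congr 1
    have h1 := PySem.List.foldl_min_le vs v
    have h2 := PySem.List.foldl_min_mem vs v
    have hMm : vs.foldl min v ≤ m := by
      rcases List.mem_cons.mp hm with rfl | hm'
      · exact h1.1
      · exact h1.2 m hm'
    have hmM : m ≤ vs.foldl min v := by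
      rcases h2 with he | hmem
      · rw [he]; exact hle v (List.mem_cons_self ..)
      · exact hle _ (List.mem_cons_of_mem _ hmem)
    exact le_antisymm hMm hmM

-- stage 1, no overlap: best_i is None exactly when no liked id is available
lemma pv_stage1_none (liked : List Int) (available : List (List (String × Int)))
    (h : liked.find? (fun i => (PySem.Set.ofList (available.map pvDishId)).contains i) = none) :
    pvBestI liked available = none := by
  rw [pvBestI, pv_minfold_filterMap]
  have hnil : available.filterMap (fun d => (pvFirstPos liked).get? (pvDishId d)) = [] := by
    rw [List.filterMap_eq_nil_iff]
    intro d hd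
    rw [pv_firstPos_get?]
    cases hf : (PySem.List.enumerate liked).find? (fun p => p.2 == pvDishId d) with
    | none => rfl
    | some p =>
      exfalso
      have hmem := List.mem_of_find?_eq_some hf
      have hpred := List.find?_some hf
      have hp2 : p.2 = pvDishId d := by simpa using hpred
      obtain ⟨k, hk, hpk⟩ := (PySem.List.mem_enumerate_iff liked 0 p).mp hmem
      have hp2mem : p.2 ∈ liked := by rw [hpk]; exact List.getElem_mem hk
      have := (List.find?_eq_none.mp h) p.2 hp2mem
      apply this
      rw [hp2]
      rw [PySem.Set.contains_eq_listContains, List.contains_eq_mem]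
      simp only [decide_eq_true_eq]
      rw [PySem.Set.mem_ofList]
      exact List.mem_map_of_mem hd
  rw [hnil]
  rfl

-- stage 1, overlap: best_i is the index of A's first match, and liked[best_i] is that match
lemma pv_stage1_some (liked : List Int) (available : List (List (String × Int))) (y : Int)
    (h : liked.find? (fun i => (PySem.Set.ofList (available.map pvDishId)).contains i) = some y) :
    ∃ (as bs : List Int), liked = as ++ y :: bs ∧
      pvBestI liked available = some (as.length : Int) := by
  obtain ⟨hpy, as, bs, hsplit, has⟩ := List.find?_eq_some_iff_append.mp h
  refine ⟨as, bs, hsplit, ?_⟩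
  have hyS : y ∈ available.map pvDishId := by
    have : (PySem.Set.ofList (available.map pvDishId)).contains y = true := by simpa using hpy
    rw [PySem.Set.contains_eq_listContains, List.contains_eq_mem] at this
    simp only [decide_eq_true_eq] at this
    rwa [PySem.Set.mem_ofList] at this
  have hasS : ∀ a ∈ as, a ∉ available.map pvDishId := by
    intro a ha hmem
    have := has a ha
    simp only [Bool.not_eq_eq_eq_not, Bool.not_true] at this
    rw [PySem.Set.contains_eq_listContains, List.contains_eq_mem] at this
    simp only [decide_eq_false_iff_not] at this
    exact this ((PySem.Set.mem_ofList _ _).mpr hmem)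
  -- enumerate decomposition
  have henum : PySem.List.enumerate liked
      = PySem.List.enumerate as 0 ++ PySem.List.enumerate (y :: bs) (0 + as.length) := by
    rw [hsplit]; exact PySem.List.enumerate_append as (y :: bs) 0
  -- the first position of y is as.length
  have hgety : (pvFirstPos liked).get? y = some (as.length : Int) := by
    rw [pv_firstPos_get?, henum, List.find?_append]
    have h1 : List.find? (fun p => p.2 == y) (PySem.List.enumerate as 0) = none := by
      rw [List.find?_eq_none]
      intro p hp
      obtain ⟨k, hk, hpk⟩ := (PySem.List.mem_enumerate_iff as 0 p).mp hp
      simp only [hpk, beq_iff_eq]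
      intro hcontra
      exact hasS _ (List.getElem_mem hk) (hcontra ▸ hyS)
    rw [h1]
    have h2 : PySem.List.enumerate (y :: bs) (0 + (as.length : Int))
        = (0 + (as.length : Int), y) :: PySem.List.enumerate bs (0 + as.length + 1) :=
      PySem.List.enumerate_cons ..
    rw [h2, List.find?_cons]
    simp
  -- every present position is ≥ as.length
  have hlow : ∀ v ∈ available.filterMap (fun d => (pvFirstPos liked).get? (pvDishId d)),
      (as.length : Int) ≤ v := by
    intro v hv
    obtain ⟨d, hd, hgd⟩ := List.mem_filterMap.mp hv
    rw [pv_firstPos_get?] at hgd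
    obtain ⟨p, hp, hpv⟩ := Option.map_eq_some_iff.mp hgd
    have hmem := List.mem_of_find?_eq_some hp
    have hp2 : p.2 = pvDishId d := by simpa using List.find?_some hp
    rw [henum] at hmem
    rcases List.mem_append.mp hmem with hin | hin
    · exfalso
      obtain ⟨k, hk, hpk⟩ := (PySem.List.mem_enumerate_iff as 0 p).mp hin
      apply hasS as[k] (List.getElem_mem hk)
      rw [← show p.2 = as[k] by rw [hpk], hp2]
      exact List.mem_map_of_mem hd
    · obtain ⟨k, hk, hpk⟩ := (PySem.List.mem_enumerate_iff (y :: bs) (0 + as.length) p).mp hin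
      rw [← hpv, hpk]
      push_cast
      omega
  -- the minimum is attained at as.length via the dish whose id is y
  obtain ⟨d0, hd0, hd0y⟩ := List.mem_map.mp hyS
  have hmem : (as.length : Int) ∈
      available.filterMap (fun d => (pvFirstPos liked).get? (pvDishId d)) :=
    List.mem_filterMap.mpr ⟨d0, hd0, by rw [hd0y, hgety]⟩
  rw [pvBestI, pv_minfold_filterMap]
  exact pv_minfold_char _ _ hmem hlow

-- ===== VERDICT (by name: the statement is the Claim_ definition above) =====
theorem recommend_dish_spec : Claim_equal_recommend_dish := by
  intro liked available _dom _pre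
  unfold Spec_recommend_dish recommend_dish recommend_dish_alt
  by_cases hav : available = []
  · simp [hav]
  · simp only [if_neg hav]
    rw [pv_body_eq, pv_pred_eq]
    cases hf : liked.find?
        (fun dish_id => (PySem.Set.ofList (available.map pvDishId)).contains dish_id) with
    | some y =>
      obtain ⟨as, bs, hsplit, hbest⟩ := pv_stage1_some liked available y hf
      rw [hbest]
      show some y = PySem.List.pyGet? liked ((as.length : Nat) : Int)
      rw [PySem.List.pyGet?_natCast, hsplit, List.getElem?_append_right (le_refl as.length)]
      simp
    | none =>
      rw [pv_stage1_none liked available hf]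
      by_cases hl : liked = []
      · simp [hl]
      · simp only [ne_eq, hl, not_false_eq_true, if_pos]
        obtain ⟨a0, arest, rfl⟩ : ∃ a0 arest, available = a0 :: arest := by
          cases available with
          | nil => exact absurd rfl hav
          | cons a t => exact ⟨a, t, rfl⟩
        have hK : pvCatOf a0 ∈ PySem.Set.ofList ((a0 :: arest).map pvCatOf) := by
          rw [PySem.Set.mem_ofList]; exact List.mem_map_of_mem (List.mem_cons_self ..)
        have hKne : PySem.Set.ofList ((a0 :: arest).map pvCatOf) ≠ [] :=
          List.ne_nil_of_mem hK
        have hsz : ((a0 :: arest).foldl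
            (fun d dish => d.modify (pvCatOf dish) [] (fun l => l ++ [pvDishId dish]))
            PySem.Dict.empty).size ≠ 0 := by
          simp only [PySem.Dict.size, pv_cats_items, List.length_map]
          exact fun h0 => hKne (List.eq_nil_of_length_eq_zero h0)
        rw [if_pos hsz, pv_cats_items, pv_max?_map, pv_key_eq]
        -- B's key: counts[cat d] = count of cat d among the categories
        have hBkey : (fun dish => (pvCounts (a0 :: arest)).getD (pvCatOf dish) 0)
            = (fun dish => ((((a0 :: arest).map pvCatOf).count (pvCatOf dish) : Nat) : Int)) := by
          funext dish
          rw [pv_counts_eq, PySem.Dict.getD_counter]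
        cases hm : PySem.List.max? (PySem.Set.ofList ((a0 :: arest).map pvCatOf))
            (fun k => ((a0 :: arest).map pvCatOf).count k) with
        | none => exact absurd ((PySem.List.max?_eq_none_iff _ _).mp hm) hKne
        | some bestk =>
          simp only [Option.map_some]
          have hBmax : PySem.List.max? (a0 :: arest)
              (fun dish => (pvCounts (a0 :: arest)).getD (pvCatOf dish) 0)
              = (a0 :: arest).find? (fun dish => pvCatOf dish == bestk) := by
            rw [hBkey, pv_max?_natCast]
            exact pv_max?_elem_eq_find? (a0 :: arest) pvCatOf _ bestk hm
          rw [hBmax]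
          -- A side: first id of the bestk group
          show PySem.List.pyGet? (((a0 :: arest).foldl
              (fun d dish => d.modify (pvCatOf dish) [] (fun l => l ++ [pvDishId dish]))
              PySem.Dict.empty).getD bestk []) 0 = _
          rw [pv_cats_getD, pv_pyGet?_zero, List.head?_map, List.head?_filter]
          have hb : bestk ∈ (a0 :: arest).map pvCatOf := by
            have := PySem.List.max?_mem hm
            rwa [PySem.Set.mem_ofList] at this
          obtain ⟨d0, hd0, rfl⟩ := List.mem_map.mp hb
          have hfs : (List.find? (fun dish => pvCatOf dish == pvCatOf d0)
              (a0 :: arest)).isSome := List.find?_isSome.mpr ⟨d0, hd0, beq_self_eq_true _⟩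
          obtain ⟨dish, hdish⟩ := Option.isSome_iff_exists.mp hfs
          rw [hdish]
          rfl
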